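-- pv_equiv track=rewrite | github.com/TheTrueFlopsy/libavr | avr/cython/tbouncer_test.py | input_to_output
-- ===== SOURCE A (Python) =====
-- def input_to_output(inpt, min_between=5, min_neq=2):
-- 	prologue_len = min_between + min_neq - 1
-- 	outpt = [ 0 for k in range(len(inpt)) ]
--
-- 	if len(inpt) < prologue_len:
-- 		return outpt
--
-- 	if all(inpt[(prologue_len - min_neq):prologue_len]):
-- 		outpt[prologue_len-1] = 1
--
-- 	flipper = (1, 0)
-- 	for j in range(prologue_len, len(inpt)):
-- 		o1 = outpt[j-1]
-- 		o0 = o1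
--
-- 		if (all(outpt[j-k] == o1 for k in range(2, prologue_len+1)) and
-- 		    all(inpt[j-k] != o1 for k in range(0, min_neq))):
-- 			o0 = flipper[o0]
--
-- 		outpt[j] = o0
--
-- 	return outpt
-- ===== SOURCE B (Python) =====
-- def input_to_output(inpt, min_between=5, min_neq=2):
--     n = len(inpt)
--     P = min_between + min_neq - 1
--     if n < P:
--         return [0] * n
--     # one pass: maintain suffix-streak counters instead of rescanning windows
--     neq0 = neq1 = 0  # lengths of the input suffix with values != 0 / != 1
--     for x in inpt[:P]:
--         neq0 = neq0 + 1 if x != 0 else 0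
--         neq1 = neq1 + 1 if x != 1 else 0
--     cur = 1 if neq0 >= min_neq else 0
--     out = [0] * (P - 1) + [cur]
--     run = 1 if cur == 1 else P  # length of the constant output suffix
--     for x in inpt[P:]:
--         neq0 = neq0 + 1 if x != 0 else 0
--         neq1 = neq1 + 1 if x != 1 else 0
--         neq = neq1 if cur == 1 else neq0
--         if run >= P and neq >= min_neq:
--             cur = 1 - cur
--             run = 1
--         else:
--             run += 1
--         out.append(cur)
--     return out
-- ===== Notes on version B (the rewrite author's own statement) =====
-- stated objective: faster
-- what changed: one pass maintaining incremental suffix-streak counters (lengths of the input suffixes with values !=0 and !=1, and the length of the constant output run) instead of rescanning a prologue_len window of outputs and a min_neq window of inputs at every step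
-- outside the precondition, e.g. on input_to_output([1, 1, 1], 0, 0): A returns [1, 0, 1], B returns [1, 0]; on input_to_output([1, 1], -1, 3): A returns [1, 1], B returns [0, 0]
import Mathlib
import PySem

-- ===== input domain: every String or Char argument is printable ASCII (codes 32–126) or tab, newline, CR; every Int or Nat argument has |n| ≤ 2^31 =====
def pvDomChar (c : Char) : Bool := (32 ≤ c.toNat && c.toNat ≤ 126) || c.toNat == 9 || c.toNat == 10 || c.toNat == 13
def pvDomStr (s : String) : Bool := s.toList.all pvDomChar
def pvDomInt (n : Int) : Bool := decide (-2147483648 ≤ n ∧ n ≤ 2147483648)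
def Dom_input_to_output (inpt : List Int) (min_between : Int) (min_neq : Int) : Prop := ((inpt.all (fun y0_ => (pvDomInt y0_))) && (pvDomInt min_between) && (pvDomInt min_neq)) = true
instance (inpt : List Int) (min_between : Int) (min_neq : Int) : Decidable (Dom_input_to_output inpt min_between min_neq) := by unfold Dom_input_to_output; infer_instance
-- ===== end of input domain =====

-- B replaces A's per-step window rescans by one pass with incremental suffix-streak counters
-- (equivalence proved on Pre_: min_between ≥ 1 and min_neq ≥ 1, the natural debouncing parameters).

-- ===== PORT A =====
-- loop body of A's for-loop (a named helper for the fold; flipper = (1, 0) is the tuple from A).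
-- pyGetD/pySetD are exact here: under Pre_ every index A uses is nonnegative and in range.
def pvStepA (inpt : List Int) (prologue_len : Int) (min_neq : Int) (outpt : List Int) (j : Int) : List Int :=
  let flipper : Int × Int := (1, 0)
  let o1 := PySem.List.pyGetD outpt (j - 1) 0
  let o0 := o1
  let o0 := if ((PySem.List.pyRange 2 (prologue_len + 1) 1).all fun k => PySem.List.pyGetD outpt (j - k) 0 == o1)
               && ((PySem.List.pyRange 0 min_neq 1).all fun k => PySem.List.pyGetD inpt (j - k) 0 != o1)
            then (if o0 == 0 then flipper.1 else flipper.2)   -- flipper[o0]; o0 ∈ {0, 1} always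
            else o0
  PySem.List.pySetD outpt j o0

def input_to_output (inpt : List Int) (min_between : Int) (min_neq : Int) : List Int :=
  let prologue_len := min_between + min_neq - 1
  let outpt := (PySem.List.pyRange 0 (inpt.length : Int) 1).map (fun _ => (0 : Int))
  if (inpt.length : Int) < prologue_len then outpt
  else
    let outpt := if (PySem.List.slice inpt (some (prologue_len - min_neq)) (some prologue_len)).all (fun x => x != 0)
                 then PySem.List.pySetD outpt (prologue_len - 1) 1 else outpt
    (PySem.List.pyRange prologue_len (inpt.length : Int) 1).foldl (pvStepA inpt prologue_len min_neq) outpt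

-- ===== PORT B =====
-- loop body of B's second for-loop; state = (neq0, neq1, cur, run, out).
def pvStepB (P : Int) (min_neq : Int) (st : Int × Int × Int × Int × List Int) (x : Int) : Int × Int × Int × Int × List Int :=
  let neq0 := if x != 0 then st.1 + 1 else 0
  let neq1 := if x != 1 then st.2.1 + 1 else 0
  let cur := st.2.2.1
  let run := st.2.2.2.1
  let out := st.2.2.2.2
  let neq := if cur == 1 then neq1 else neq0
  if run ≥ P ∧ neq ≥ min_neq then (neq0, neq1, 1 - cur, 1, out ++ [1 - cur])
  else (neq0, neq1, cur, run + 1, out ++ [cur])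

def input_to_output_alt (inpt : List Int) (min_between : Int) (min_neq : Int) : List Int :=
  let n := (inpt.length : Int)
  let P := min_between + min_neq - 1
  if n < P then List.replicate inpt.length 0
  else
    let s := (PySem.List.slice inpt none (some P)).foldl
      (fun (st : Int × Int) x => (if x != 0 then st.1 + 1 else 0, if x != 1 then st.2 + 1 else 0)) (0, 0)
    let cur : Int := if s.1 ≥ min_neq then 1 else 0
    let out := List.replicate (P - 1).toNat 0 ++ [cur]
    let run : Int := if cur == 1 then 1 else P
    ((PySem.List.slice inpt (some P) none).foldl (pvStepB P min_neq) (s.1, s.2, cur, run, out)).2.2.2.2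

-- ===== PRECONDITION & SPEC =====
-- Pre_ restricts to the natural domain of the debouncing parameters (positive counts).
-- For zero or negative min_between/min_neq, A's indexing either raises IndexError or silently
-- wraps around via Python negative indices — accidental behaviour no caller relies on.
def Pre_input_to_output (inpt : List Int) (min_between : Int) (min_neq : Int) : Prop :=
  1 ≤ min_between ∧ 1 ≤ min_neq
instance (inpt : List Int) (min_between : Int) (min_neq : Int) : Decidable (Pre_input_to_output inpt min_between min_neq) := by unfold Pre_input_to_output; infer_instance

def pvWitness_input_to_output : List Int × Int × Int := ([1, 1, 0, 0, 1, 1, 1], 2, 2)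

def Spec_input_to_output (inpt : List Int) (min_between : Int) (min_neq : Int) (out : List Int) : Prop := out = input_to_output_alt inpt min_between min_neq
instance (inpt : List Int) (min_between : Int) (min_neq : Int) (out : List Int) : Decidable (Spec_input_to_output inpt min_between min_neq out) := by unfold Spec_input_to_output; infer_instance

-- ===== CLAIM (what is proved, stated in full; the proofs are below) =====
def Claim_equal_input_to_output : Prop := ∀ (inpt : List Int) (min_between : Int) (min_neq : Int), Dom_input_to_output inpt min_between min_neq → Pre_input_to_output inpt min_between min_neq → Spec_input_to_output inpt min_between min_neq (input_to_output inpt min_between min_neq)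

-- ===== LEMMAS AND PROOFS =====

-- length of the maximal suffix of l all of whose elements satisfy p
def pvStreak (p : Int → Bool) (l : List Int) : Nat := (l.reverse.takeWhile p).length

theorem pvStreak_nil (p : Int → Bool) : pvStreak p [] = 0 := rfl

theorem pvStreak_append_singleton (p : Int → Bool) (l : List Int) (x : Int) :
    pvStreak p (l ++ [x]) = if p x then pvStreak p l + 1 else 0 := by
  unfold pvStreak
  rw [List.reverse_append]
  simp [List.takeWhile]
  by_cases h : p x <;> simp [h]

theorem pvTakeWhile_len_iff (p : Int → Bool) :
    ∀ (r : List Int) (m : Nat), m ≤ r.length →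
      ((∀ i, (h : i < r.length) → i < m → p r[i]) ↔ m ≤ (r.takeWhile p).length) := by
  intro r
  induction r with
  | nil => intro m hm; simp at hm; simp [hm]
  | cons x t ih =>
    intro m hm
    cases m with
    | zero => simp
    | succ m' =>
      simp only [List.length_cons, Nat.add_le_add_iff_right] at hm
      rw [List.takeWhile_cons]
      constructor
      · intro h
        have hx : p x := h 0 (by simp) (Nat.succ_pos _)
        rw [if_pos hx]
        simp only [List.length_cons, Nat.add_le_add_iff_right]
        exact (ih m' hm).mp (fun i hi him => h (i+1) (by simp; omega) (Nat.succ_lt_succ him))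
      · intro h i hi him
        by_cases hx : p x
        · rw [if_pos hx] at h
          simp only [List.length_cons, Nat.add_le_add_iff_right] at h
          cases i with
          | zero => exact hx
          | succ i' =>
            have hi' : i' < t.length := by simpa using hi
            exact (ih m' hm).mpr h i' hi' (Nat.lt_of_succ_lt_succ him)
        · rw [if_neg hx] at h; simp at h

-- the bridge: the last m entries of l all satisfy p ↔ m ≤ pvStreak p l
theorem pvBridge (p : Int → Bool) (l : List Int) (m : Nat) (hm : m ≤ l.length) :
    (∀ i, (h : i < l.length) → l.length - m ≤ i → p l[i]) ↔ m ≤ pvStreak p l := by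
  unfold pvStreak
  rw [← pvTakeWhile_len_iff p l.reverse m (by simpa using hm)]
  constructor
  · intro h i hi him
    rw [List.getElem_reverse]
    exact h _ (by simp at hi ⊢; omega) (by simp at hi; omega)
  · intro h i hi him
    have hrl : l.length - 1 - i < l.reverse.length := by simp; omega
    have hv : l.reverse[l.length - 1 - i]'hrl = l[i]'hi := by
      rw [List.getElem_reverse]
      congr 1
      omega
    have := h _ hrl (by omega)
    rwa [hv] at this

theorem pvAll_drop (p : Int → Bool) (l : List Int) (k : Nat) :
    (l.drop k).all p = true ↔ ∀ i, (h : i < l.length) → k ≤ i → p l[i] := by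
  rw [List.all_eq_true]
  constructor
  · intro h i hi hk
    have : l[i] ∈ l.drop k := by
      rw [List.mem_iff_getElem]
      exact ⟨i - k, by simp; omega, by rw [List.getElem_drop]; congr 1; omega⟩
    exact h _ this
  · intro h x hx
    rw [List.mem_iff_getElem] at hx
    obtain ⟨i, hi, rfl⟩ := hx
    rw [List.getElem_drop]
    exact h _ (by simp at hi; omega) (by omega)

theorem pvBridge_drop (p : Int → Bool) (l : List Int) (m : Nat) (hm : m ≤ l.length) :
    (l.drop (l.length - m)).all p = true ↔ m ≤ pvStreak p l := by
  rw [pvAll_drop, ← pvBridge p l m hm]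

theorem pvStreak_replicate (p : Int → Bool) (k : Nat) (a : Int) :
    pvStreak p (List.replicate k a) = if p a then k else 0 := by
  induction k with
  | zero => simp [pvStreak]
  | succ k ih =>
    rw [List.replicate_succ', pvStreak_append_singleton, ih]
    by_cases h : p a <;> simp [h]

-- prologue counters: the pair fold computes the two input streaks
theorem pvPairFold (l : List Int) : ∀ (l0 : List Int),
    l.foldl (fun (st : Int × Int) x => (if x != 0 then st.1 + 1 else 0, if x != 1 then st.2 + 1 else 0))
      (((pvStreak (fun x => x != 0) l0 : Nat) : Int), ((pvStreak (fun x => x != 1) l0 : Nat) : Int))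
    = (((pvStreak (fun x => x != 0) (l0 ++ l) : Nat) : Int), ((pvStreak (fun x => x != 1) (l0 ++ l) : Nat) : Int)) := by
  induction l with
  | nil => intro l0; simp
  | cons x t ih =>
    intro l0
    rw [List.foldl_cons]
    have h0 : (if x != 0 then ((pvStreak (fun x => x != 0) l0 : Nat) : Int) + 1 else 0)
        = ((pvStreak (fun x => x != 0) (l0 ++ [x]) : Nat) : Int) := by
      rw [pvStreak_append_singleton]
      by_cases h : x != 0 <;> simp [h]
    have h1 : (if x != 1 then ((pvStreak (fun x => x != 1) l0 : Nat) : Int) + 1 else 0)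
        = ((pvStreak (fun x => x != 1) (l0 ++ [x]) : Nat) : Int) := by
      rw [pvStreak_append_singleton]
      by_cases h : x != 1 <;> simp [h]
    rw [h0, h1, ih (l0 ++ [x])]
    simp

theorem pvSetAppend (l : List Int) (x v : Int) (r : List Int) :
    (l ++ x :: r).set l.length v = l ++ v :: r := by
  induction l with
  | nil => simp
  | cons y t ih => simp [ih]

theorem pvSetAppend' (l : List Int) (x v : Int) (r : List Int) (i : Nat) (hi : i = l.length) :
    (l ++ x :: r).set i v = l ++ v :: r := by
  rw [hi, pvSetAppend]


theorem pvStreak_pos_last (p : Int → Bool) (out : List Int) (h1 : 1 ≤ pvStreak p out)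
    (hl : 0 < out.length) : p (out[out.length - 1]'(by omega)) := by
  have := (pvBridge p out 1 hl).mpr h1 (out.length - 1) (by omega) (by omega)
  exact this

theorem pvStreak_zero_of_last (p : Int → Bool) (out : List Int)
    (hl : 0 < out.length) (hfail : ¬ p (out[out.length - 1]'(by omega)) = true) : pvStreak p out = 0 := by
  by_contra h
  exact hfail (pvStreak_pos_last p out (by omega) hl)

-- A's inner rescan of the last prologue_len outputs ↔ the run counter
theorem pvCond1_iff (out tail0 : List Int) (cur P : Int) (j : Nat)
    (hP1 : 1 ≤ P) (hPj : P ≤ (j : Int)) (hlen : out.length = j)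
    (hrun : 1 ≤ pvStreak (fun y => y == cur) out) :
    (((PySem.List.pyRange 2 (P + 1) 1).all fun k => PySem.List.pyGetD (out ++ tail0) ((j : Int) - k) 0 == cur) = true)
      ↔ P ≤ (pvStreak (fun y => y == cur) out : Int) := by
  have hPt : ((P.toNat : Int)) = P := Int.toNat_of_nonneg (by omega)
  have hPtj : P.toNat ≤ j := by omega
  have hbr := pvBridge (fun y => y == cur) out P.toNat (by omega)
  have hlast : out[out.length - 1]'(by omega) = cur := by
    have := pvStreak_pos_last (fun y => y == cur) out hrun (by omega)
    simpa using this
  rw [List.all_eq_true]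
  constructor
  · intro h
    have : P.toNat ≤ pvStreak (fun y => y == cur) out := by
      apply hbr.mp
      intro i hi him
      by_cases hij : i = j - 1
      · subst hij
        have hv : out[j - 1]'(by omega) = cur := by
          have h' := hlast
          simp only [hlen] at h'
          exact h'
        simp [hv]
      · have hk2 : (2 : Int) ≤ (j : Int) - i := by omega
        have hkP : (j : Int) - i < P + 1 := by omega
        have := h ((j : Int) - i) (by rw [PySem.List.mem_pyRange_one]; exact ⟨hk2, hkP⟩)
        have hidx : (j : Int) - ((j : Int) - i) = ((i : Nat) : Int) := by omega
        rw [hidx, PySem.List.pyGetD_natCast, List.getD_append _ _ _ _ (by omega),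
          List.getD_eq_getElem _ _ (by omega)] at this
        simpa using this
    omega
  · intro h k hk
    rw [PySem.List.mem_pyRange_one] at hk
    obtain ⟨hk2, hkP⟩ := hk
    have hik : (j : Int) - k = ((j - k.toNat : Nat) : Int) := by omega
    rw [hik, PySem.List.pyGetD_natCast, List.getD_append _ _ _ _ (by omega),
      List.getD_eq_getElem _ _ (by omega)]
    have := hbr.mpr (by omega) (j - k.toNat) (by omega) (by omega)
    simpa using this

-- A's inner rescan of the last min_neq inputs ↔ the updated input-streak counter
theorem pvCond2_iff (inpt : List Int) (cur mn : Int) (j : Nat)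
    (hmn : 1 ≤ mn) (hmnj : mn ≤ (j : Int)) (hjn : j < inpt.length) :
    (((PySem.List.pyRange 0 mn 1).all fun k => PySem.List.pyGetD inpt ((j : Int) - k) 0 != cur) = true)
      ↔ mn ≤ (pvStreak (fun y => y != cur) (inpt.take (j + 1)) : Int) := by
  have hlen : (inpt.take (j + 1)).length = j + 1 := by
    rw [List.length_take]; omega
  have hbr := pvBridge (fun y => y != cur) (inpt.take (j + 1)) mn.toNat (by omega)
  rw [List.all_eq_true]
  constructor
  · intro h
    have : mn.toNat ≤ pvStreak (fun y => y != cur) (inpt.take (j + 1)) := by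
      apply hbr.mp
      intro i hi him
      have hk0 : (0 : Int) ≤ (j : Int) - i := by omega
      have hkm : (j : Int) - i < mn := by omega
      have := h ((j : Int) - i) (by rw [PySem.List.mem_pyRange_one]; exact ⟨hk0, hkm⟩)
      have hidx : (j : Int) - ((j : Int) - i) = ((i : Nat) : Int) := by omega
      rw [hidx, PySem.List.pyGetD_natCast, List.getD_eq_getElem _ _ (by omega)] at this
      have hit : (inpt.take (j + 1))[i]'(by omega) = inpt[i]'(by omega) := List.getElem_take
      rw [hit]
      simpa using this
    omega
  · intro h k hk
    rw [PySem.List.mem_pyRange_one] at hk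
    obtain ⟨hk0, hkm⟩ := hk
    have hik : (j : Int) - k = ((j - k.toNat : Nat) : Int) := by omega
    rw [hik, PySem.List.pyGetD_natCast, List.getD_eq_getElem _ _ (by omega)]
    have := hbr.mpr (by omega) (j - k.toNat) (by omega) (by omega)
    have hit : (inpt.take (j + 1))[j - k.toNat]'(by omega) = inpt[j - k.toNat]'(by omega) := List.getElem_take
    rw [hit] at this
    simpa using this

theorem pvStreak_take_succ (p : Int → Bool) (inpt : List Int) (j : Nat) (x : Int) (rem' : List Int)
    (hdrop : inpt.drop j = x :: rem') :
    pvStreak p (inpt.take (j + 1)) = if p x then pvStreak p (inpt.take j) + 1 else 0 := by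
  have hx : inpt[j]? = some x := by
    have h0 : (inpt.drop j)[0]? = inpt[j + 0]? := List.getElem?_drop
    rw [hdrop] at h0
    simpa using h0.symm
  rw [List.take_add_one, hx]
  simpa using pvStreak_append_singleton p (inpt.take j) x


-- one step of A's loop, written as the corresponding update of B's state
theorem pvStepA_eq (inpt : List Int) (P mn : Int) (j : Nat) (x : Int) (rem' : List Int)
    (out : List Int) (cur : Int)
    (hmn : 1 ≤ mn) (hmnP : mn ≤ P) (hdrop : inpt.drop j = x :: rem')
    (hPj : P ≤ (j : Int)) (hlen : out.length = j)
    (hcur : cur = 0 ∨ cur = 1) (hrun : 1 ≤ pvStreak (fun y => y == cur) out) :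
    pvStepA inpt P mn (out ++ List.replicate (inpt.length - j) 0) (j : Int)
    = if P ≤ (pvStreak (fun y => y == cur) out : Int) ∧ mn ≤ (pvStreak (fun y => y != cur) (inpt.take (j + 1)) : Int)
      then (out ++ [1 - cur]) ++ List.replicate (inpt.length - (j + 1)) 0
      else (out ++ [cur]) ++ List.replicate (inpt.length - (j + 1)) 0 := by
  have hjn : j < inpt.length := by
    have h := congrArg List.length hdrop
    rw [List.length_drop] at h
    simp at h
    omega
  have hlast : out[j - 1]'(by omega) = cur := by
    have h' := pvStreak_pos_last (fun y => y == cur) out hrun (by omega)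
    simp only [hlen] at h'
    simpa using h'
  have ho1 : PySem.List.pyGetD (out ++ List.replicate (inpt.length - j) 0) ((j : Int) - 1) 0 = cur := by
    have hcast : (j : Int) - 1 = ((j - 1 : Nat) : Int) := by omega
    rw [hcast, PySem.List.pyGetD_natCast, List.getD_append _ _ _ _ (by omega),
      List.getD_eq_getElem _ _ (by omega)]
    exact hlast
  have hc1 := pvCond1_iff out (List.replicate (inpt.length - j) 0) cur P j (by omega) hPj hlen hrun
  have hc2 := pvCond2_iff inpt cur mn j hmn (by omega) hjn
  have hrep : List.replicate (inpt.length - j) (0 : Int) = (0 : Int) :: List.replicate (inpt.length - (j + 1)) 0 := by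
    have he : inpt.length - j = (inpt.length - (j + 1)) + 1 := by omega
    rw [he, List.replicate_succ]
  simp only [pvStepA, ho1]
  by_cases hq : P ≤ (pvStreak (fun y => y == cur) out : Int) ∧ mn ≤ (pvStreak (fun y => y != cur) (inpt.take (j + 1)) : Int)
  · rw [if_pos (by rw [Bool.and_eq_true]; exact ⟨hc1.mpr hq.1, hc2.mpr hq.2⟩), if_pos hq]
    have hv : (if (cur == 0) = true then ((1 : Int), (0 : Int)).1 else ((1 : Int), (0 : Int)).2) = 1 - cur := by
      rcases hcur with rfl | rfl <;> norm_num
    rw [hv, PySem.List.pySetD_natCast, hrep, pvSetAppend' _ _ _ _ _ hlen.symm,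
      List.append_assoc]
    rfl
  · rw [if_neg (by rw [Bool.and_eq_true]; intro hb; exact hq ⟨hc1.mp hb.1, hc2.mp hb.2⟩), if_neg hq]
    rw [PySem.List.pySetD_natCast, hrep, pvSetAppend' _ _ _ _ _ hlen.symm,
      List.append_assoc]
    rfl

-- one step of B's loop, with its counters re-expressed as streaks of the longer prefix
theorem pvStepB_eq (inpt : List Int) (P mn : Int) (j : Nat) (x : Int) (rem' : List Int)
    (out : List Int) (cur : Int)
    (hdrop : inpt.drop j = x :: rem') (hcur : cur = 0 ∨ cur = 1) :
    pvStepB P mn ((pvStreak (fun y => y != 0) (inpt.take j) : Nat),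
                  (pvStreak (fun y => y != 1) (inpt.take j) : Nat),
                  cur, (pvStreak (fun y => y == cur) out : Nat), out) x
    = if P ≤ (pvStreak (fun y => y == cur) out : Int) ∧ mn ≤ (pvStreak (fun y => y != cur) (inpt.take (j + 1)) : Int)
      then (((pvStreak (fun y => y != 0) (inpt.take (j + 1)) : Nat) : Int),
            ((pvStreak (fun y => y != 1) (inpt.take (j + 1)) : Nat) : Int),
            1 - cur, 1, out ++ [1 - cur])
      else (((pvStreak (fun y => y != 0) (inpt.take (j + 1)) : Nat) : Int),
            ((pvStreak (fun y => y != 1) (inpt.take (j + 1)) : Nat) : Int),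
            cur, ((pvStreak (fun y => y == cur) out : Nat) : Int) + 1, out ++ [cur]) := by
  have hs0 := pvStreak_take_succ (fun y => y != 0) inpt j x rem' hdrop
  have hs1 := pvStreak_take_succ (fun y => y != 1) inpt j x rem' hdrop
  have hns0 : (if x != 0 then ((pvStreak (fun y => y != 0) (inpt.take j) : Nat) : Int) + 1 else 0)
      = ((pvStreak (fun y => y != 0) (inpt.take (j + 1)) : Nat) : Int) := by
    rw [hs0]; by_cases h : x != 0 <;> simp [h]
  have hns1 : (if x != 1 then ((pvStreak (fun y => y != 1) (inpt.take j) : Nat) : Int) + 1 else 0)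
      = ((pvStreak (fun y => y != 1) (inpt.take (j + 1)) : Nat) : Int) := by
    rw [hs1]; by_cases h : x != 1 <;> simp [h]
  rcases hcur with rfl | rfl
  · simp only [pvStepB, hns0, hns1, ge_iff_le]
    norm_num
  · simp only [pvStepB, hns0, hns1, ge_iff_le]
    norm_num

-- ===== main loop lemma =====
theorem pvMainLoop (inpt : List Int) (P mn : Int) (hmn : 1 ≤ mn) (hmnP : mn ≤ P) :
    ∀ (rem : List Int) (j : Nat) (out : List Int) (cur : Int),
      inpt.drop j = rem →
      P ≤ (j : Int) →
      out.length = j →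
      (cur = 0 ∨ cur = 1) →
      1 ≤ pvStreak (fun y => y == cur) out →
      (PySem.List.pyRange (j : Int) (inpt.length : Int) 1).foldl (pvStepA inpt P mn)
          (out ++ List.replicate (inpt.length - j) 0)
        = (rem.foldl (pvStepB P mn)
            ((pvStreak (fun y => y != 0) (inpt.take j) : Nat),
             (pvStreak (fun y => y != 1) (inpt.take j) : Nat),
             cur, (pvStreak (fun y => y == cur) out : Nat), out)).2.2.2.2 := by
  intro rem
  induction rem with
  | nil =>
    intro j out cur hdrop hPj hlen hcur hrun
    have hjn : inpt.length ≤ j := by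
      have h := congrArg List.length hdrop
      rw [List.length_drop] at h
      simp at h
      omega
    rw [PySem.List.pyRange_one_eq_nil (by exact_mod_cast hjn)]
    simp [show inpt.length - j = 0 from by omega]
  | cons x rem' ih =>
    intro j out cur hdrop hPj hlen hcur hrun
    have hjn : j < inpt.length := by
      have h := congrArg List.length hdrop
      rw [List.length_drop] at h
      simp at h
      omega
    have hdrop' : inpt.drop (j + 1) = rem' := by
      have h2 : (inpt.drop j).drop 1 = inpt.drop (j + 1) := List.drop_drop
      rw [hdrop] at h2
      simpa using h2.symm
    have hcast : ((j : Int) + 1) = ((j + 1 : Nat) : Int) := by push_cast; ring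
    rw [PySem.List.pyRange_one_cons (by exact_mod_cast hjn), List.foldl_cons, List.foldl_cons,
      pvStepA_eq inpt P mn j x rem' out cur hmn hmnP hdrop hPj hlen hcur hrun,
      pvStepB_eq inpt P mn j x rem' out cur hdrop hcur, hcast]
    by_cases hq : P ≤ (pvStreak (fun y => y == cur) out : Int) ∧ mn ≤ (pvStreak (fun y => y != cur) (inpt.take (j + 1)) : Int)
    · rw [if_pos hq, if_pos hq]
      have hlast : out[out.length - 1]'(by omega) = cur := by
        have h' := pvStreak_pos_last (fun y => y == cur) out hrun (by omega)
        simpa using h'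
      have hz : pvStreak (fun y => y == 1 - cur) out = 0 := by
        apply pvStreak_zero_of_last _ _ (by omega)
        rw [hlast]
        rcases hcur with rfl | rfl <;> norm_num
      have hstr : pvStreak (fun y => y == 1 - cur) (out ++ [1 - cur]) = 1 := by
        rw [pvStreak_append_singleton, hz]
        simp
      have hcur' : 1 - cur = 0 ∨ 1 - cur = 1 := by rcases hcur with rfl | rfl <;> norm_num
      have := ih (j + 1) (out ++ [1 - cur]) (1 - cur) hdrop' (by push_cast; omega)
        (by simp [hlen]) hcur' (by rw [hstr])
      rw [hstr] at this
      simpa using this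
    · rw [if_neg hq, if_neg hq]
      have hstr : pvStreak (fun y => y == cur) (out ++ [cur]) = pvStreak (fun y => y == cur) out + 1 := by
        rw [pvStreak_append_singleton]
        simp
      have := ih (j + 1) (out ++ [cur]) cur hdrop' (by push_cast; omega)
        (by simp [hlen]) hcur (by rw [hstr]; omega)
      rw [hstr] at this
      simpa using this

-- ===== VERDICT (by name: the statement is the Claim_ definition above) =====
-- prologue: A's conditional set of outpt[prologue_len-1] equals B's initial segment
theorem pvMapZero (n : Nat) : (PySem.List.pyRange 0 (n : Int) 1).map (fun _ => (0 : Int)) = List.replicate n 0 := by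
  rw [List.eq_replicate_iff]
  constructor
  · rw [List.length_map, PySem.List.length_pyRange_one]
    simp
  · intro b hb
    rw [List.mem_map] at hb
    obtain ⟨_, _, rfl⟩ := hb
    rfl

theorem pvReplSplit (n Pt : Nat) (h1 : 1 ≤ Pt) (h2 : Pt ≤ n) :
    List.replicate n (0 : Int) = List.replicate (Pt - 1) 0 ++ (0 : Int) :: List.replicate (n - Pt) 0 := by
  have he : n = (Pt - 1) + (1 + (n - Pt)) := by omega
  conv_lhs => rw [he]
  rw [List.replicate_add, List.replicate_add]
  rfl

theorem input_to_output_spec : Claim_equal_input_to_output := by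
  intro inpt mb mn hdom hpre
  obtain ⟨hmb, hmn⟩ := hpre
  unfold Spec_input_to_output
  simp only [input_to_output, input_to_output_alt]
  have hP1 : 1 ≤ mb + mn - 1 := by omega
  have hmnP : mn ≤ mb + mn - 1 := by omega
  by_cases hlt : (inpt.length : Int) < mb + mn - 1
  · rw [if_pos hlt, if_pos hlt, pvMapZero]
  · rw [if_neg hlt, if_neg hlt, pvMapZero]
    have hge : mb + mn - 1 ≤ (inpt.length : Int) := by omega
    have hPt : ((mb + mn - 1).toNat : Int) = mb + mn - 1 := by omega
    have hPtn : (mb + mn - 1).toNat ≤ inpt.length := by omega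
    have hPt1 : 1 ≤ (mb + mn - 1).toNat := by omega
    have hmt : (mb + mn - 1).toNat - mn.toNat = (mb + mn - 1 - mn).toNat := by omega
    -- B's prologue fold = the two input streaks over the first prologue_len inputs
    have hsliceB : PySem.List.slice inpt none (some (mb + mn - 1)) = inpt.take (mb + mn - 1).toNat :=
      PySem.List.slice_to _ (by omega)
    have hpair := pvPairFold (inpt.take (mb + mn - 1).toNat) []
    simp only [pvStreak_nil, Nat.cast_zero, List.nil_append] at hpair
    -- A's prologue slice condition = the streak condition B tests
    have htklen : (inpt.take (mb + mn - 1).toNat).length = (mb + mn - 1).toNat := by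
      rw [List.length_take]
      omega
    have hsliceA : PySem.List.slice inpt (some (mb + mn - 1 - mn)) (some (mb + mn - 1))
        = (inpt.take (mb + mn - 1).toNat).drop ((inpt.take (mb + mn - 1).toNat).length - mn.toNat) := by
      rw [PySem.List.slice_toNat _ (by omega) (by omega), htklen, ← hmt, List.drop_take]
    have hcondA : (PySem.List.slice inpt (some (mb + mn - 1 - mn)) (some (mb + mn - 1))).all (fun x => x != 0) = true
        ↔ mn ≤ (pvStreak (fun y => y != 0) (inpt.take (mb + mn - 1).toNat) : Int) := by
      rw [hsliceA, pvBridge_drop _ _ _ (by rw [htklen]; omega)]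
      omega
    rw [hsliceB, hpair, PySem.List.slice_from _ (by omega)]
    simp only [ge_iff_le]
    by_cases hc : mn ≤ (pvStreak (fun y => y != 0) (inpt.take (mb + mn - 1).toNat) : Int)
    · rw [if_pos (hcondA.mpr hc), if_pos hc]
      rw [show mb + mn - 1 - 1 = (((mb + mn - 1).toNat - 1 : Nat) : Int) from by omega,
        PySem.List.pySetD_natCast,
        pvReplSplit inpt.length (mb + mn - 1).toNat hPt1 hPtn,
        pvSetAppend' _ _ _ _ _ (by rw [List.length_replicate])]
      have hout : List.replicate ((mb + mn - 1).toNat - 1) (0 : Int) ++ (1 : Int) :: List.replicate (inpt.length - (mb + mn - 1).toNat) 0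
          = (List.replicate ((mb + mn - 1).toNat - 1) (0 : Int) ++ [(1 : Int)]) ++ List.replicate (inpt.length - (mb + mn - 1).toNat) 0 := by
        rw [List.append_assoc]
        rfl
      have hrun0 : pvStreak (fun y => y == (1 : Int)) (List.replicate ((mb + mn - 1).toNat - 1) (0 : Int) ++ [(1 : Int)]) = 1 := by
        rw [pvStreak_append_singleton, pvStreak_replicate]
        norm_num
      have hmain := pvMainLoop inpt (mb + mn - 1) mn hmn hmnP (inpt.drop (mb + mn - 1).toNat)
        (mb + mn - 1).toNat (List.replicate ((mb + mn - 1).toNat - 1) (0 : Int) ++ [(1 : Int)]) 1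
        rfl (by omega) (by rw [List.length_append, List.length_replicate]; simp; omega)
        (Or.inr rfl) (by rw [hrun0])
      rw [hrun0, hPt] at hmain
      simp only [Nat.cast_one] at hmain
      rw [hout, hmain]
      simp only [Int.toNat_natCast]
      norm_num
    · rw [if_neg (fun hb => hc (hcondA.mp hb)), if_neg hc]
      rw [pvReplSplit inpt.length (mb + mn - 1).toNat hPt1 hPtn]
      have hout : List.replicate ((mb + mn - 1).toNat - 1) (0 : Int) ++ (0 : Int) :: List.replicate (inpt.length - (mb + mn - 1).toNat) 0
          = (List.replicate ((mb + mn - 1).toNat - 1) (0 : Int) ++ [(0 : Int)]) ++ List.replicate (inpt.length - (mb + mn - 1).toNat) 0 := by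
        rw [List.append_assoc]
        rfl
      have hrun0 : pvStreak (fun y => y == (0 : Int)) (List.replicate ((mb + mn - 1).toNat - 1) (0 : Int) ++ [(0 : Int)]) = (mb + mn - 1).toNat := by
        rw [pvStreak_append_singleton, pvStreak_replicate]
        simp
        omega
      have hmain := pvMainLoop inpt (mb + mn - 1) mn hmn hmnP (inpt.drop (mb + mn - 1).toNat)
        (mb + mn - 1).toNat (List.replicate ((mb + mn - 1).toNat - 1) (0 : Int) ++ [(0 : Int)]) 0
        rfl (by omega) (by rw [List.length_append, List.length_replicate]; simp; omega)
        (Or.inl rfl) (by rw [hrun0]; omega)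
      rw [hrun0, hPt] at hmain
      rw [hout, hmain]
      rw [show ((mb + mn - 1 : Int) - 1).toNat = (mb + mn - 1).toNat - 1 from by omega]
      norm_num
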